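-- pv_equiv track=rewrite | github.com/lesoaress/cursoPython | desafio_aula_27_nome_mais_curto.py | mais_curto
-- ===== SOURCE A (Python) =====
-- def mais_curto(nomes):
--     i = 1
--     nomes[0] = nomes[0].strip()
--     tamanho_do_menor_nome = len(nomes[0])
--     menor_nome = nomes[0]
--
--     while i < len(nomes):
--         nomes[i] = nomes[i].strip()
--         if len(nomes[i]) < tamanho_do_menor_nome:
--             tamanho_do_menor_nome = len(nomes[i])
--             menor_nome = nomes[i]
--         i += 1
--     return menor_nome
-- ===== SOURCE B (Python) =====
-- def mais_curto(nomes):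
--     nomes[:] = [n.strip() for n in nomes]
--     return sorted(nomes, key=len)[0]
-- ===== Notes on version B (the rewrite author's own statement) =====
-- stated objective: alternative
-- what changed: B strips every element in place and then stably sorts the list by length and returns the first element (sort-then-pick) instead of A's single scan tracking the running minimum; stability makes the head the first minimum-length element, matching A's strict-< tie rule.
import Mathlib
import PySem

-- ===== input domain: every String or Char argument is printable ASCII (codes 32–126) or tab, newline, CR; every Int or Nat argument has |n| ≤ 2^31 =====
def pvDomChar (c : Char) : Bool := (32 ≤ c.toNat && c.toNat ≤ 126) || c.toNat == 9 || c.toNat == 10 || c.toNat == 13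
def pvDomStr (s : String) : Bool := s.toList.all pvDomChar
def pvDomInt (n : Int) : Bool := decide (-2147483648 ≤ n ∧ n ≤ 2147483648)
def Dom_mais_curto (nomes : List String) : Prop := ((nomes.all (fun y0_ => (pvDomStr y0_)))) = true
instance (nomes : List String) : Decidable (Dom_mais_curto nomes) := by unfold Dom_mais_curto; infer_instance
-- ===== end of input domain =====

-- B strips every element in one pass (in place, like A) and then returns sorted(nomes, key=len)[0]
-- (stable sort, so the head is the first minimum-length element), instead of A's single scan
-- tracking the running minimum; same in-place mutation, equivalence proved about the return value.


-- ===== PORT A =====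
-- while-loop over i = 1..len-1 carrying (menor_nome, tamanho_do_menor_nome); the in-place
-- writes nomes[i] = nomes[i].strip() do not affect the returned value (each slot is read once),
-- so the port folds over the tail, stripping as it goes, exactly in A's order.
def mcStep (st : String × Int) (x : String) : String × Int :=
  let x' := PySem.Str.strip x
  if PySem.Str.len x' < st.2 then (x', PySem.Str.len x') else st

def mais_curto (nomes : List String) : String :=
  match nomes with
  | [] => ""   -- Python raises IndexError on nomes[0]; excluded by Pre_mais_curto
  | h :: t =>
    let h0 := PySem.Str.strip h
    (t.foldl mcStep (h0, PySem.Str.len h0)).1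

-- ===== PORT B =====
-- B: strip all elements first, then sorted(nomes, key=len)[0] (stable sort).
def mais_curto_alt (nomes : List String) : String :=
  let stripped := nomes.map PySem.Str.strip
  (PySem.List.pyGet? (PySem.List.sorted stripped (fun s => PySem.Str.len s)) 0).getD ""
  -- [0] raises IndexError only for []; excluded by Pre_

-- ===== PRECONDITION & SPEC =====
-- Pre_ excludes only the empty list, on which both A and B raise IndexError.
def Pre_mais_curto (nomes : List String) : Prop := nomes ≠ []
instance (nomes : List String) : Decidable (Pre_mais_curto nomes) := by unfold Pre_mais_curto; infer_instance
def pvWitness_mais_curto : List String := ["  ana ", "jo", "carlos"]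

def Spec_mais_curto (nomes : List String) (out : String) : Prop := out = mais_curto_alt nomes
instance (nomes : List String) (out : String) : Decidable (Spec_mais_curto nomes out) := by unfold Spec_mais_curto; infer_instance

-- ===== CLAIM (what is proved, stated in full; the proofs are below) =====
def Claim_equal_mais_curto : Prop := ∀ (nomes : List String), Dom_mais_curto nomes → Pre_mais_curto nomes → Spec_mais_curto nomes (mais_curto nomes)

-- ===== LEMMAS AND PROOFS =====

-- head of an insertBy step: inserting x keeps whichever of x / current head wins 'before'
lemma head?_insertBy {A : Type} (before : A → A → Bool) (x h : A) (t : List A) :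
    (PySem.List.insertBy before x (h :: t)).head? = some (if before x h then x else h) := by
  by_cases hb : before x h
  · simp [PySem.List.insertBy, hb]
  · simp [PySem.List.insertBy, hb]

-- invariant: the head of the insertion-sort accumulator is A's running minimum
lemma head_invariant (t : List String) :
    ∀ (acc : List String) (m : String), acc.head? = some m →
    ((t.map PySem.Str.strip).foldl
        (fun acc x => PySem.List.insertBy
          (fun a b => decide (PySem.Str.len a < PySem.Str.len b)) x acc) acc).head?
      = some ((t.foldl mcStep (m, PySem.Str.len m)).1) := by
  induction t with
  | nil => intro acc m hm; exact hm
  | cons x t ih =>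
    intro acc m hm
    match acc, hm with
    | h :: rest, hm =>
      simp only [List.head?_cons, Option.some_inj] at hm
      subst hm
      simp only [List.map_cons, List.foldl_cons]
      by_cases hlt : PySem.Str.len (PySem.Str.strip x) < PySem.Str.len h
      · rw [ih _ (PySem.Str.strip x)
            (by rw [head?_insertBy]; simp only [decide_eq_true_eq]; rw [if_pos hlt])]
        congr 1
        simp only [mcStep]
        rw [if_pos hlt]
      · rw [ih _ h
            (by rw [head?_insertBy]; simp only [decide_eq_true_eq]; rw [if_neg hlt])]
        congr 1
        simp only [mcStep]
        rw [if_neg hlt]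

-- ===== VERDICT (by name: the statement is the Claim_ definition above) =====
theorem mais_curto_spec : Claim_equal_mais_curto := by
  intro nomes _ hpre
  match nomes with
  | [] => exact absurd rfl hpre
  | h :: t =>
    show mais_curto (h :: t) = mais_curto_alt (h :: t)
    simp only [mais_curto, mais_curto_alt, List.map_cons, PySem.List.sorted, List.foldl_cons]
    have h1 : PySem.List.insertBy
        (fun a b => decide (PySem.Str.len a < PySem.Str.len b)) (PySem.Str.strip h) ([] : List String)
        = [PySem.Str.strip h] := by simp [PySem.List.insertBy]
    rw [if_neg (by decide)] at *
    rw [h1]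
    have h2 := head_invariant t [PySem.Str.strip h] (PySem.Str.strip h) rfl
    generalize hE : ((t.map PySem.Str.strip).foldl _ _) = L at h2 ⊢
    match L, h2 with
    | r :: rest, h2 =>
      simp only [Option.some_inj, List.head?] at h2
      simp [PySem.List.pyGet?, PySem.List.pyIdx?, h2]
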